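-- pv_equiv track=rewrite | github.com/KASSII/Kaggle_LuxAI-s3 | src/data_prepare/create_db.py | generate_sequence
-- ===== SOURCE A (Python) =====
-- def generate_sequence(limit):
--     sequence = [15]  # 初項
--     increments = [6, 7, 7]  # 以降の増分パターン
--     index = 0
--
--     while sequence[-1] + increments[index % 3] <= limit:
--         sequence.append(sequence[-1] + increments[index % 3])
--         index += 1
--
--     return [8] + sequence
-- ===== SOURCE B (Python) =====
-- def generate_sequence(limit):
--     # Count-then-generate: compute the number of terms in closed form,
--     # then emit the sequence directly from term(j) = 15 + 20*(j//3) + [0,6,13][j%3].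
--     if limit < 21:
--         return [8, 15]
--     q = (limit - 15) // 20
--     r = (limit - 15) % 20
--     off = 2 if r >= 13 else (1 if r >= 6 else 0)
--     k = 3 * q + off
--     return [8] + [15 + 20 * (j // 3) + (0 if j % 3 == 0 else 6 if j % 3 == 1 else 13)
--                   for j in range(k + 1)]
-- ===== Notes on version B (the rewrite author's own statement) =====
-- stated objective: alternative
-- what changed: Replaces A's incremental while-loop (appending term after term until the limit is exceeded) by computing the number of terms k in closed form from divmod(limit-15, 20) and then generating each term directly via term(j) = 15 + 20*(j//3) + [0,6,13][j%3].
import Mathlib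
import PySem

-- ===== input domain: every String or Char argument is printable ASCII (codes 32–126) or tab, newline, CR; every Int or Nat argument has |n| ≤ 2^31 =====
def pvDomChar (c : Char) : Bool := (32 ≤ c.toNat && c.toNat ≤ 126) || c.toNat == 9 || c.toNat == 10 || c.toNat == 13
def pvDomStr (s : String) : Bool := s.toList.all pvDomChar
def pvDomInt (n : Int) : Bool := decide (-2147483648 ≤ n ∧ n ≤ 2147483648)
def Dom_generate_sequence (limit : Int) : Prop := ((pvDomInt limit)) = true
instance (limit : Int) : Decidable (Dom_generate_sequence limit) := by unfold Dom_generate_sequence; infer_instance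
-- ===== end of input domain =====

-- B replaces A's incremental append-while-loop by a closed-form count of the terms
-- followed by direct generation of each term (objective: alternative decomposition).

-- ===== PORT A =====
-- increments[index % 3] for increments = [6, 7, 7]
def genA_inc (index : Nat) : Int :=
  match index % 3 with
  | 0 => 6
  | 1 => 7
  | _ => 7

-- the while loop; `last` carries sequence[-1], `seq` the list built so far
def genA_loop (limit : Int) (seq : List Int) (last : Int) (index : Nat) : List Int :=
  if last + genA_inc index ≤ limit then
    genA_loop limit (seq ++ [last + genA_inc index]) (last + genA_inc index) (index + 1)
  else
    seq
termination_by (limit - last).toNat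
decreasing_by
  have h6 : 6 ≤ genA_inc index := by
    unfold genA_inc; rcases index % 3 with _ | _ | n <;> simp
  omega

def generate_sequence (limit : Int) : List Int :=
  [8] ++ genA_loop limit [15] 15 0

-- ===== PORT B =====
def generate_sequence_alt (limit : Int) : List Int :=
  if limit < 21 then [8, 15]
  else
    let q := PySem.Int.floordiv (limit - 15) 20
    let r := PySem.Int.mod (limit - 15) 20
    let off : Int := if 13 ≤ r then 2 else if 6 ≤ r then 1 else 0
    let k := 3 * q + off
    [8] ++ (PySem.List.pyRange 0 (k + 1) 1).map (fun j =>
      15 + 20 * PySem.Int.floordiv j 3 +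
        (if PySem.Int.mod j 3 = 0 then 0 else if PySem.Int.mod j 3 = 1 then 6 else 13))

-- ===== PRECONDITION & SPEC =====
def Spec_generate_sequence (limit : Int) (out : List Int) : Prop := out = generate_sequence_alt limit
instance (limit : Int) (out : List Int) : Decidable (Spec_generate_sequence limit out) := by unfold Spec_generate_sequence; infer_instance

-- ===== CLAIM (what is proved, stated in full; the proofs are below) =====
def Claim_equal_generate_sequence : Prop := ∀ (limit : Int), Dom_generate_sequence limit → Spec_generate_sequence limit (generate_sequence limit)

-- ===== LEMMAS AND PROOFS =====

-- the j-th term of the sequence A builds (j = 0 is the initial 15)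
def pvTerm (j : Nat) : Int :=
  15 + 20 * ((j / 3 : Nat) : Int) + (if j % 3 = 0 then 0 else if j % 3 = 1 then 6 else 13)

lemma pvTerm_succ (j : Nat) : pvTerm (j + 1) = pvTerm j + genA_inc j := by
  have h3 : j % 3 = 0 ∨ j % 3 = 1 ∨ j % 3 = 2 := by omega
  rcases h3 with h | h | h <;>
  · unfold pvTerm genA_inc
    rw [h]
    have h1 : (j + 1) % 3 = (j % 3 + 1) % 3 := by omega
    have h2 : (j + 1) / 3 = if j % 3 = 2 then j / 3 + 1 else j / 3 := by
      split <;> omega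
    rw [h] at h1 h2
    simp at h1 h2
    rw [h1, h2]
    push_cast
    ring

lemma pvTerm_step_le (j : Nat) : pvTerm j + 6 ≤ pvTerm (j + 1) := by
  have h6 : 6 ≤ genA_inc j := by
    unfold genA_inc; rcases j % 3 with _ | _ | m <;> simp
  have := pvTerm_succ j
  omega

lemma pvTerm_mono {i j : Nat} (h : i ≤ j) : pvTerm i ≤ pvTerm j := by
  induction j, h using Nat.le_induction with
  | base => omega
  | succ n hn ih =>
    have := pvTerm_step_le n
    omega

lemma genA_loop_eq (limit : Int) (K : Nat)
    (hK : ∀ j : Nat, pvTerm j ≤ limit ↔ j ≤ K) :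
    ∀ (n j : Nat) (acc : List Int), K - j = n →
      genA_loop limit acc (pvTerm j) j = acc ++ (List.range' (j + 1) (K - j)).map pvTerm := by
  intro n
  induction n with
  | zero =>
    intro j acc hn
    rw [genA_loop]
    have hcond : ¬ (pvTerm j + genA_inc j ≤ limit) := by
      rw [← pvTerm_succ, hK]; omega
    simp [hcond, hn]
  | succ n ih =>
    intro j acc hn
    rw [genA_loop]
    have hcond : pvTerm j + genA_inc j ≤ limit := by
      rw [← pvTerm_succ, hK]; omega
    rw [if_pos hcond, ← pvTerm_succ]
    rw [ih (j + 1) (acc ++ [pvTerm (j + 1)]) (by omega)]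
    have hr : List.range' (j + 1) (K - j) = (j + 1) :: List.range' (j + 2) (K - (j + 1)) := by
      have : K - j = (K - (j + 1)) + 1 := by omega
      rw [this, List.range'_succ]
    rw [hr]
    simp

lemma pvTerm_cast (j : Nat) :
    15 + 20 * PySem.Int.floordiv (0 + (j : Int)) 3 +
      (if PySem.Int.mod (0 + (j : Int)) 3 = 0 then 0
       else if PySem.Int.mod (0 + (j : Int)) 3 = 1 then 6 else 13) = pvTerm j := by
  rw [PySem.Int.floordiv_eq_ediv_of_pos (by norm_num), PySem.Int.mod_eq_emod_of_pos (by norm_num)]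
  unfold pvTerm
  split_ifs <;> omega

-- for limit ≥ 21, B's k (as a Nat) is exactly the largest index with pvTerm ≤ limit
lemma pvK_spec (limit : Int) (h21 : ¬ limit < 21) :
    ∀ j : Nat, pvTerm j ≤ limit ↔
      j ≤ (3 * PySem.Int.floordiv (limit - 15) 20 +
            (if 13 ≤ PySem.Int.mod (limit - 15) 20 then 2
             else if 6 ≤ PySem.Int.mod (limit - 15) 20 then 1 else 0)).toNat := by
  intro j
  rw [PySem.Int.floordiv_eq_ediv_of_pos (by norm_num), PySem.Int.mod_eq_emod_of_pos (by norm_num)]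
  set q := (limit - 15) / 20 with hq
  set r := (limit - 15) % 20 with hr
  have hqr : 20 * q + r = limit - 15 := by rw [hq, hr]; omega
  have hrb : 0 ≤ r ∧ r < 20 := by constructor <;> omega
  have hq0 : 0 ≤ q := by omega
  set K := (3 * q + (if 13 ≤ r then 2 else if 6 ≤ r then 1 else 0)).toNat with hKdef
  have hKmod : pvTerm K ≤ limit ∧ ¬ pvTerm (K + 1) ≤ limit := by
    have hK3 : (K : Int) = 3 * q + (if 13 ≤ r then 2 else if 6 ≤ r then 1 else 0) := by
      rw [hKdef]; split_ifs <;> omega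
    unfold pvTerm
    split_ifs at hK3 ⊢ <;> omega
  constructor
  · intro hle
    by_contra hgt
    have : pvTerm (K + 1) ≤ pvTerm j := pvTerm_mono (by omega)
    omega
  · intro hle
    have : pvTerm j ≤ pvTerm K := pvTerm_mono hle
    omega

-- ===== VERDICT (by name: the statement is the Claim_ definition above) =====
theorem generate_sequence_spec : Claim_equal_generate_sequence := by
  intro limit _
  unfold Spec_generate_sequence generate_sequence generate_sequence_alt
  by_cases h21 : limit < 21
  · rw [if_pos h21]
    rw [genA_loop]
    have : ¬ ((15 : Int) + genA_inc 0 ≤ limit) := by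
      unfold genA_inc; simp; omega
    simp [this]
  · rw [if_neg h21]
    have hK := pvK_spec limit h21
    set K := (3 * PySem.Int.floordiv (limit - 15) 20 +
      (if 13 ≤ PySem.Int.mod (limit - 15) 20 then 2
       else if 6 ≤ PySem.Int.mod (limit - 15) 20 then 1 else 0)).toNat with hKdef
    have h0 : pvTerm 0 = 15 := by norm_num [pvTerm]
    have hloop := genA_loop_eq limit K hK K 0 [pvTerm 0] rfl
    rw [h0] at hloop
    rw [hloop]
    have hk0 : (0 : Int) ≤ 3 * PySem.Int.floordiv (limit - 15) 20 +
      (if 13 ≤ PySem.Int.mod (limit - 15) 20 then 2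
       else if 6 ≤ PySem.Int.mod (limit - 15) 20 then 1 else 0) := by
      rw [PySem.Int.floordiv_eq_ediv_of_pos (by norm_num), PySem.Int.mod_eq_emod_of_pos (by norm_num)]
      split_ifs <;> omega
    have hlen : ((3 * PySem.Int.floordiv (limit - 15) 20 +
      (if 13 ≤ PySem.Int.mod (limit - 15) 20 then 2
       else if 6 ≤ PySem.Int.mod (limit - 15) 20 then 1 else 0) + 1) - 0).toNat = K + 1 := by
      rw [hKdef]; omega
    simp only [PySem.List.pyRange_one, hlen, List.map_map]
    have hmap : (List.range (K + 1)).map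
        ((fun j => 15 + 20 * PySem.Int.floordiv j 3 +
          (if PySem.Int.mod j 3 = 0 then 0 else if PySem.Int.mod j 3 = 1 then 6 else 13)) ∘
          (fun k : Nat => (0 : Int) + k)) = (List.range (K + 1)).map pvTerm := by
      apply List.map_congr_left
      intro j _
      exact pvTerm_cast j
    rw [hmap]
    have hrange : List.range (K + 1) = 0 :: List.range' 1 K := by
      rw [List.range_eq_range', List.range'_succ]
    rw [hrange]
    simp [h0]
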